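-- pv_equiv track=rewrite | github.com/albertdavid00/Algoritmi-Fundamentali | AlgoritmiFundamentali/Labs/Lab3/clustering.py | getSortedEdges
-- ===== SOURCE A (Python) =====
-- def levDistance(fstWord, sndWord):
--     if not len(fstWord):
--         return len(sndWord)
--
--     if not len(sndWord):
--         return len(fstWord)
--
--     if fstWord[0] == sndWord[0]:
--         return levDistance(fstWord[1:], sndWord[1:])
--
--     return 1 + min(levDistance(fstWord[1:], sndWord),
--                    levDistance(fstWord, sndWord[1:]),
--                    levDistance(fstWord[1:], sndWord[1:]))
--
-- def getSortedEdges(words):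
--     edges = []
--
--     for i in range(len(words) - 1):
--         for j in range(i + 1, len(words)):
--             dist = levDistance(words[i], words[j])
--             edges.append((i, j, dist))
--
--     edges.sort(key=lambda e: e[2])
--     return edges
-- ===== SOURCE B (Python) =====
-- def levDP(a, b):
--     # distance over suffixes: row[j] = distance(a_suffix, b[j:]), built bottom-up
--     n = len(b)
--     row = list(range(n, -1, -1))          # for a_suffix == "": distance is len(b[j:]) = n - j
--     for i in range(len(a) - 1, -1, -1):
--         new = [0] * (n + 1)
--         new[n] = len(a) - i
--         for j in range(n - 1, -1, -1):
--             if a[i] == b[j]: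
--                 new[j] = row[j + 1]
--             else:
--                 new[j] = 1 + min(row[j], new[j + 1], row[j + 1])
--         row = new
--     return row[0]
--
-- def getSortedEdges(words):
--     n = len(words)
--     edges = [(i, j, levDP(words[i], words[j]))
--              for i in range(n) for j in range(i + 1, n)]
--     return sorted(edges, key=lambda e: e[2])
-- ===== Notes on version B (the rewrite author's own statement) =====
-- stated objective: faster
-- what changed: Replaces A's exponential three-way recursive Levenshtein distance with an iterative two-row dynamic-programming table over suffixes; edges are built by a comprehension and passed to sorted() instead of an in-place sort of an appended list.
import Mathlib
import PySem

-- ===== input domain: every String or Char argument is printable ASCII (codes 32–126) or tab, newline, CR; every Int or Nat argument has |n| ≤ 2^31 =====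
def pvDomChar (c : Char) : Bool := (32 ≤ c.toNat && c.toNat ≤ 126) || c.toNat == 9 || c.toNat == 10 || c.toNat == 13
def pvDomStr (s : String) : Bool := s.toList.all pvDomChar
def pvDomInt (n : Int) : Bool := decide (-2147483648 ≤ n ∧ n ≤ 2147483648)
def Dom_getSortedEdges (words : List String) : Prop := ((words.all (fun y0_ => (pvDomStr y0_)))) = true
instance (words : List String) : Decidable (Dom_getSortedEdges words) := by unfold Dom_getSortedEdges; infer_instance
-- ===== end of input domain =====

-- B replaces A's exponential three-way recursion for the Levenshtein distance by a
-- two-row dynamic-programming table over suffixes (objective: faster, asymptotic).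

-- ===== PORT A =====
-- levDistance: A's recursion on the two words (strings, ported over their character lists)
def levA : List Char → List Char → Nat
  | [], b => b.length                                   -- if not len(fstWord): return len(sndWord)
  | a, [] => a.length                                   -- if not len(sndWord): return len(fstWord)
  | x :: xs, y :: ys =>
      if x == y then levA xs ys                         -- fstWord[0] == sndWord[0]
      else 1 + min (levA xs (y :: ys)) (min (levA (x :: xs) ys) (levA xs ys))
termination_by a b => a.length + b.length

def getSortedEdges (words : List String) : List (Int × Int × Int) :=
  let edges : List (Int × Int × Int) :=
    (PySem.List.pyRange 0 (PySem.List.len words - 1) 1).foldl (fun acc i =>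
      (PySem.List.pyRange (i + 1) (PySem.List.len words) 1).foldl (fun acc2 j =>
        acc2 ++ [(i, j, ((levA (PySem.List.pyGetD words i "").toList
                               (PySem.List.pyGetD words j "").toList : Nat) : Int))]) acc) []
  PySem.List.sorted edges (fun e => e.2.2) false

-- ===== PORT B =====
-- initial DP row, for the empty first word: row[j] = len(b[j:]) (built right-to-left)
def rowInit : List Char → List Nat
  | [] => [0]
  | _ :: t => (t.length + 1) :: rowInit t

-- one DP step: from the row of distances for `a`-suffix `rest` to the row for `c :: rest`
def stepRow (c : Char) : List Char → List Nat → List Nat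
  | [], old => [old.headD 0 + 1]                        -- new[n] = len(a) - i
  | bj :: bt, old =>
      let rest := stepRow c bt old.tail
      (if c == bj then old.tail.headD 0
       else 1 + min (old.headD 0) (min (rest.headD 0) (old.tail.headD 0))) :: rest

def rowFor : List Char → List Char → List Nat
  | [], b => rowInit b
  | c :: t, b => stepRow c b (rowFor t b)

def levAlt (a b : List Char) : Nat := (rowFor a b).headD 0

def getSortedEdges_alt (words : List String) : List (Int × Int × Int) :=
  let n : Int := PySem.List.len words
  let edges : List (Int × Int × Int) :=
    (PySem.List.pyRange 0 n 1).flatMap (fun i =>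
      (PySem.List.pyRange (i + 1) n 1).map (fun j =>
        (i, j, ((levAlt (PySem.List.pyGetD words i "").toList
                        (PySem.List.pyGetD words j "").toList : Nat) : Int))))
  PySem.List.sorted edges (fun e => e.2.2) false

-- ===== PRECONDITION & SPEC =====
def Spec_getSortedEdges (words : List String) (out : List (Int × Int × Int)) : Prop := out = getSortedEdges_alt words
instance (words : List String) (out : List (Int × Int × Int)) : Decidable (Spec_getSortedEdges words out) := by unfold Spec_getSortedEdges; infer_instance

-- ===== CLAIM (what is proved, stated in full; the proofs are below) =====
def Claim_equal_getSortedEdges : Prop := ∀ (words : List String), Dom_getSortedEdges words → Spec_getSortedEdges words (getSortedEdges words)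

-- ===== LEMMAS AND PROOFS =====

theorem levA_nil_right (a : List Char) : levA a [] = a.length := by
  cases a <;> simp [levA]

theorem headD_tails_map {α β : Type} (f : List α → β) (b : List α) (d : β) :
    (b.tails.map f).headD d = f b := by
  cases b <;> simp

theorem rowInit_eq (b : List Char) : rowInit b = b.tails.map List.length := by
  induction b with
  | nil => simp [rowInit]
  | cons c t ih => simp [rowInit, ih]

theorem stepRow_eq (c : Char) (r : List Char) (b : List Char) :
    stepRow c b (b.tails.map (levA r)) = b.tails.map (levA (c :: r)) := by
  induction b with
  | nil =>
    simp [stepRow, levA_nil_right]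
  | cons bj bt ih =>
    simp only [List.tails_cons, List.map_cons, stepRow, List.tail_cons]
    rw [ih]
    simp only [headD_tails_map]
    congr 1
    simp [levA]

theorem rowFor_eq (a b : List Char) : rowFor a b = b.tails.map (levA a) := by
  induction a with
  | nil =>
    rw [rowFor, rowInit_eq]
    apply List.map_congr_left
    intro x _
    simp [levA]
  | cons c t ih =>
    rw [rowFor, ih, stepRow_eq]

theorem levAlt_eq (a b : List Char) : levAlt a b = levA a b := by
  rw [levAlt, rowFor_eq, headD_tails_map]

theorem getSortedEdges_spec_aux (words : List String) :
    getSortedEdges words = getSortedEdges_alt words := by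
  unfold getSortedEdges getSortedEdges_alt
  simp only [levAlt_eq, PySem.List.foldl_append_singleton_eq_map,
             PySem.List.foldl_append_eq_flatMap, List.nil_append]
  congr 1
  by_cases h : words = []
  · subst h
    simp [PySem.List.len_eq, PySem.List.pyRange_one_eq_nil]
  · have hlen : (1 : Int) ≤ PySem.List.len words := by
      simp only [PySem.List.len_eq]
      have : 0 < words.length := List.length_pos_iff.mpr h
      omega
    rw [PySem.List.pyRange_one_append 0 (PySem.List.len words - 1) (PySem.List.len words)
          (by omega) (by omega), List.flatMap_append]
    have hsing : PySem.List.pyRange (PySem.List.len words - 1) (PySem.List.len words) 1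
        = [PySem.List.len words - 1] := by
      have := PySem.List.pyRange_one_singleton (PySem.List.len words - 1)
      simpa using this
    rw [hsing]
    simp [PySem.List.pyRange_one_eq_nil]

-- ===== VERDICT (by name: the statement is the Claim_ definition above) =====
theorem getSortedEdges_spec : Claim_equal_getSortedEdges := by
  intro words _
  unfold Spec_getSortedEdges
  exact getSortedEdges_spec_aux words
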